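-- pv_equiv track=rewrite | github.com/zufuliu/notepad4 | tools/StringSwitch.py | small_string_hash
-- ===== SOURCE A (Python) =====
-- SwitchOption_HashAndLength = 3
--
-- def small_string_hash(buf, hash_size, switch_option):
-- 	value = 0
-- 	mask = (1 << hash_size) - 1
-- 	for ch in buf:
-- 		value = value * 3 + ch
-- 		value = value & mask
-- 	if switch_option == SwitchOption_HashAndLength:
-- 		value |= (len(buf) << hash_size)
-- 	return f'0x{value:X}U'
-- ===== SOURCE B (Python) =====
-- SwitchOption_HashAndLength = 3
--
-- def small_string_hash(buf, hash_size, switch_option):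
-- 	mask = (1 << hash_size) - 1
-- 	value = 0
-- 	power = 1
-- 	for ch in reversed(buf):
-- 		value = (value + ch * power) & mask
-- 		power = (power * 3) & mask
-- 	if switch_option == SwitchOption_HashAndLength:
-- 		value |= (len(buf) << hash_size)
-- 	return f'0x{value:X}U'
-- ===== Notes on version B (the rewrite author's own statement) =====
-- stated objective: alternative
-- what changed: A accumulates the hash by Horner's rule (value = value*3 + ch left to right); B evaluates the polynomial directly over the reversed buffer, maintaining a masked running power of 3 and adding ch*power each step, which agrees because reduction mod the power-of-two mask commutes with the accumulation.
import Mathlib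
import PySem

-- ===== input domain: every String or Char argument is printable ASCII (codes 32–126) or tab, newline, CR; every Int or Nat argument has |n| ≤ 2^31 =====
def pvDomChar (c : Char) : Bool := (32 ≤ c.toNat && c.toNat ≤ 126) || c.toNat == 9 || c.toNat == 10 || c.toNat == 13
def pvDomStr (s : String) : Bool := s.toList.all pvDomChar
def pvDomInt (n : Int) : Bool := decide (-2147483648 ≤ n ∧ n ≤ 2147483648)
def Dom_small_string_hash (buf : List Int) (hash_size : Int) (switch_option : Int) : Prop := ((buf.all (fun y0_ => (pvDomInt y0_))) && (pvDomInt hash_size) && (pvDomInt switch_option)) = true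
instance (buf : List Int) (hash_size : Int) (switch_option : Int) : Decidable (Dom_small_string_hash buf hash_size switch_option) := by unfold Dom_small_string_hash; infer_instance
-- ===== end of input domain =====

-- B replaces A's Horner loop by a direct polynomial evaluation over the reversed buffer,
-- maintaining a masked running power of 3 (alternative decomposition, same cost).

-- shared formatting helper: f'0x{v:X}U' (uppercase hex; '-' before the digits for a negative v)
def pvHexDigit (n : Nat) : Char := if n < 10 then Char.ofNat (48 + n) else Char.ofNat (55 + n)

def pvHexChars (n : Nat) : List Char :=
  if _h : n < 16 then [pvHexDigit n]
  else pvHexChars (n / 16) ++ [pvHexDigit (n % 16)]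
  decreasing_by exact Nat.div_lt_self (by omega) (by omega)

def pvFmtX (v : Int) : String :=
  "0x" ++ (if v < 0 then "-" ++ String.ofList (pvHexChars (-v).toNat) else String.ofList (pvHexChars v.toNat)) ++ "U"

def pvSwitchOption_HashAndLength : Int := 3

-- ===== PORT A =====
-- '1 << hash_size' / 'len(buf) << hash_size': Pre_ gives 0 ≤ hash_size (Python raises ValueError otherwise)
def small_string_hash (buf : List Int) (hash_size : Int) (switch_option : Int) : String :=
  let mask : Int := ((1 : Int) <<< hash_size.toNat) - 1
  let value : Int := buf.foldl (fun value ch => PySem.Int.band (value * 3 + ch) mask) 0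
  let value : Int :=
    if switch_option = pvSwitchOption_HashAndLength then
      PySem.Int.bor value (PySem.List.len buf <<< hash_size.toNat)
    else value
  pvFmtX value

-- ===== PORT B =====
def small_string_hash_alt (buf : List Int) (hash_size : Int) (switch_option : Int) : String :=
  let mask : Int := ((1 : Int) <<< hash_size.toNat) - 1
  let vp : Int × Int := buf.reverse.foldl
    (fun (vp : Int × Int) ch => (PySem.Int.band (vp.1 + ch * vp.2) mask, PySem.Int.band (vp.2 * 3) mask)) (0, 1)
  let value : Int := vp.1
  let value : Int :=
    if switch_option = pvSwitchOption_HashAndLength then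
      PySem.Int.bor value (PySem.List.len buf <<< hash_size.toNat)
    else value
  pvFmtX value

-- ===== PRECONDITION & SPEC =====
-- Pre_ excludes only negative hash_size, where Python's '1 << hash_size' raises ValueError in both A and B.
def Pre_small_string_hash (buf : List Int) (hash_size : Int) (switch_option : Int) : Prop :=
  0 ≤ hash_size
instance (buf : List Int) (hash_size : Int) (switch_option : Int) : Decidable (Pre_small_string_hash buf hash_size switch_option) := by unfold Pre_small_string_hash; infer_instance

def pvWitness_small_string_hash : List Int × Int × Int := ([65, 66, 67], 8, 3)

def Spec_small_string_hash (buf : List Int) (hash_size : Int) (switch_option : Int) (out : String) : Prop := out = small_string_hash_alt buf hash_size switch_option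
instance (buf : List Int) (hash_size : Int) (switch_option : Int) (out : String) : Decidable (Spec_small_string_hash buf hash_size switch_option out) := by unfold Spec_small_string_hash; infer_instance

-- ===== CLAIM (what is proved, stated in full; the proofs are below) =====
def Claim_equal_small_string_hash : Prop := ∀ (buf : List Int) (hash_size : Int) (switch_option : Int), Dom_small_string_hash buf hash_size switch_option → Pre_small_string_hash buf hash_size switch_option → Spec_small_string_hash buf hash_size switch_option (small_string_hash buf hash_size switch_option)

-- ===== LEMMAS AND PROOFS =====

theorem pv_neg_mod (y m : Int) (hm : 0 < m) : (-y-1) % m = m - 1 - y % m := by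
  have hr0 : 0 ≤ y % m := Int.emod_nonneg y (by omega)
  have hr1 : y % m < m := Int.emod_lt_of_pos y hm
  have h : -y-1 = (m - 1 - y % m) + m * (-(y/m)-1) := by
    have := Int.emod_add_mul_ediv y m; linarith
  rw [h, Int.add_mul_emod_self_left, Int.emod_eq_of_lt (by omega) (by omega)]

-- Python '&' with the mask 2^k - 1 is reduction mod 2^k (also on negative arguments)
theorem pv_band_mask (x : Int) (k : Nat) : PySem.Int.band x (2^k - 1) = x % 2^k := by
  have hc : ((2:Int)^k) = ((2^k : Nat) : Int) := by push_cast; ring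
  have hk : (0:Nat) < 2^k := Nat.two_pow_pos k
  have h1 : ((2:Int)^k - 1).toNat = 2^k - 1 := by rw [hc]; omega
  unfold PySem.Int.band
  by_cases hx : 0 ≤ x
  · simp only [hx, if_true, if_pos (by rw [hc]; omega : (0:Int) ≤ 2^k - 1)]
    rw [h1, Nat.and_two_pow_sub_one_eq_mod, hc]
    rw [← Int.toNat_of_nonneg hx]
    push_cast
    rfl
  · simp only [hx, if_false, if_pos (by rw [hc]; omega : (0:Int) ≤ 2^k - 1)]
    rw [h1, Nat.and_comm, Nat.and_two_pow_sub_one_eq_mod]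
    have hx1 : ((-x-1).toNat : Int) = -x-1 := by omega
    conv_rhs => rw [show x = -((-x-1).toNat : Int)-1 from by omega]
    rw [pv_neg_mod _ _ (by rw [hc]; exact_mod_cast hk)]
    have hb : (-x-1).toNat % 2^k < 2^k := Nat.mod_lt _ hk
    have hmc : ((((-x-1).toNat % 2^k : Nat)) : Int) = ((-x-1).toNat : Int) % ((2^k : Nat) : Int) := Int.natCast_mod _ _
    rw [hc, ← hmc]
    omega

-- A's per-step-masked fold equals one mask after the bare Horner fold
theorem pv_foldA (l : List Int) (k : Nat) : ∀ acc : Int,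
    l.foldl (fun v ch => (v*3+ch) % (2^k)) (acc % 2^k)
      = (l.foldl (fun v ch => v*3+ch) acc) % 2^k := by
  induction l with
  | nil => intro acc; rfl
  | cons a t ih =>
    intro acc
    simp only [List.foldl_cons]
    rw [show (acc % 2^k * 3 + a) % 2^k = (acc*3+a) % 2^k by
      simp [Int.mul_emod, Int.add_emod, Int.emod_emod_of_dvd], ih]

-- bare Horner fold with a general accumulator
theorem pv_hornerAcc (l : List Int) : ∀ acc : Int,
    l.foldl (fun v ch => v*3+ch) acc = acc * 3^l.length + l.foldl (fun v ch => v*3+ch) 0 := by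
  induction l with
  | nil => intro acc; simp
  | cons a t ih =>
    intro acc
    simp only [List.foldl_cons, List.length_cons]
    rw [ih (acc*3+a), ih (0*3+a)]
    ring

theorem pv_modAdd (x y a m : Int) : (x % m + a * (y % m)) % m = (x + a*y) % m := by
  simp [Int.add_emod, Int.mul_emod, Int.emod_emod_of_dvd]

theorem pv_modMul3 (y m : Int) : ((y % m) * 3) % m = (y*3) % m := by
  simp [Int.mul_emod]

-- B's reversed, per-step-masked fold computes the masked Horner value
theorem pv_foldB (k : Nat) (l : List Int) : ∀ v p : Int, v % 2^k = v →
    ((l.reverse.foldl (fun (vp : Int × Int) ch => ((vp.1 + ch * vp.2) % 2^k, (vp.2 * 3) % 2^k)) (v, p)).1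
        = (v + p * l.foldl (fun v ch => v*3+ch) 0) % 2^k)
    ∧ ((l = [] ∧ (l.reverse.foldl (fun (vp : Int × Int) ch => ((vp.1 + ch * vp.2) % 2^k, (vp.2 * 3) % 2^k)) (v, p)).2 = p)
       ∨ (l.reverse.foldl (fun (vp : Int × Int) ch => ((vp.1 + ch * vp.2) % 2^k, (vp.2 * 3) % 2^k)) (v, p)).2
            = (p * 3^l.length) % 2^k) := by
  induction l with
  | nil =>
    intro v p hv
    exact ⟨by simpa using hv.symm, Or.inl ⟨rfl, rfl⟩⟩
  | cons a t ih =>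
    intro v p hv
    obtain ⟨ih1, ih2⟩ := ih v p hv
    simp only [List.reverse_cons, List.foldl_append, List.foldl_cons, List.foldl_nil,
      List.length_cons]
    rw [pv_hornerAcc t (0*3+a)]
    rcases ih2 with ⟨ht, h2⟩ | h2
    · subst ht
      simp only [List.foldl_nil, List.length_nil] at ih1 ⊢
      rw [ih1, h2]
      refine ⟨?_, Or.inr ?_⟩
      · rw [show v + p * 0 = v from by ring, hv,
          show v + p * ((0*3+a) * 3^(0:Nat) + 0) = v + a * p from by ring,
          ← Int.emod_add_emod v, hv]
      · norm_num
    · rw [ih1, h2]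
      refine ⟨?_, Or.inr ?_⟩
      · rw [show (v + p * ((0*3+a) * 3^t.length + t.foldl (fun v ch => v*3+ch) 0))
              = (v + p * t.foldl (fun v ch => v*3+ch) 0) + a * (p * 3^t.length) from by ring,
          pv_modAdd]
      · rw [pv_modMul3, show p * 3^t.length * 3 = p * 3^(t.length+1) from by ring]

-- ===== VERDICT (by name: the statement is the Claim_ definition above) =====
theorem small_string_hash_spec : Claim_equal_small_string_hash := by
  intro buf hash_size switch_option _ _
  show small_string_hash buf hash_size switch_option = small_string_hash_alt buf hash_size switch_option
  have hm : (1:Int) <<< hash_size.toNat - 1 = 2^hash_size.toNat - 1 := by simp [Int.shiftLeft_eq]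
  simp only [small_string_hash, small_string_hash_alt, hm, pv_band_mask]
  rw [(pv_foldB hash_size.toNat buf 0 1 (by simp)).1]
  have hA := pv_foldA buf hash_size.toNat 0
  rw [Int.zero_emod] at hA
  rw [hA, show (0:Int) + 1 * buf.foldl (fun v ch => v*3+ch) 0 = buf.foldl (fun v ch => v*3+ch) 0 from by ring]
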